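-- pv_equiv track=rewrite | github.com/Konrad22/KryptoLAB | U02_Vigenere/functions.py | partition_text
-- ===== SOURCE A (Python) =====
-- def partition_text(text, n):
--     list = []
--     text = text.translate({ord(i): None for i in '., -ÄÖÜ'})
--     for i in range(n):
--         part_text = ""
--         while i < len(text):
--             part_text += text[i]
--             i += n
--         list.append(part_text)
--     return list
-- ===== SOURCE B (Python) =====
-- def partition_text(text, n):
--     text = text.translate({ord(i): None for i in '., -ÄÖÜ'})
--     if n <= 0:
--         return []
--     buckets = [[] for _ in range(n)]
--     for j, c in enumerate(text):
--         buckets[j % n].append(c)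
--     return ["".join(b) for b in buckets]
-- ===== Notes on version B (the rewrite author's own statement) =====
-- stated objective: alternative
-- what changed: Replaces A's n strided scans (one inner while-loop per column index) by a single sequential pass that distributes each character into bucket j % n.
import Mathlib
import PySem

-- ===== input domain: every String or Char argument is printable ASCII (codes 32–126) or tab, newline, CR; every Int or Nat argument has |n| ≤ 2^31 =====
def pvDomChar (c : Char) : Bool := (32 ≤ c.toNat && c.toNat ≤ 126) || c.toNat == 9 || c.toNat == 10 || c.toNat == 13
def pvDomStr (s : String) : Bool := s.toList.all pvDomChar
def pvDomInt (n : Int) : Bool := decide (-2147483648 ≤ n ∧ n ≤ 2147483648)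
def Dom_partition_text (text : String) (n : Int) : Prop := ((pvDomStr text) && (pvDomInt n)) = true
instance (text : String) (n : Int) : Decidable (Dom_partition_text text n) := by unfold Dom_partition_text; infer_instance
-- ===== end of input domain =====

-- B replaces A's per-column strided scans by one sequential pass distributing characters
-- into bucket j % n (same cost; objective: alternative decomposition).

-- ===== PORT A =====
-- text.translate({ord(i): None for i in '., -ÄÖÜ'}) : delete exactly those characters
def pvClean (cs : List Char) : List Char :=
  cs.filter (fun c => !(c == '.' || c == ',' || c == ' ' || c == '-' || c == 'Ä' || c == 'Ö' || c == 'Ü'))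

-- the inner 'while i < len(text): part_text += text[i]; i += n' loop of A;
-- the '0 < n' conjunct only makes the recursion total (every call site has 0 < n)
def pvColA (cs : List Char) (n : Int) (i : Int) : List Char :=
  if h : i < (cs.length : Int) ∧ 0 < n then
    PySem.List.pyGetD cs i ' ' :: pvColA cs n (i + n)
  else []
termination_by ((cs.length : Int) - i).toNat
decreasing_by omega

def partition_text (text : String) (n : Int) : List String :=
  let cs := pvClean text.toList
  (PySem.List.pyRange 0 n 1).map (fun i => String.mk (pvColA cs n i))

-- ===== PORT B =====
-- 'for j, c in enumerate(text): buckets[j % n].append(c)'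
def pvIdx : List Char → Nat → List (Nat × Char)
  | [], _ => []
  | c :: t, j => (j, c) :: pvIdx t (j + 1)

def pvBLoop (m : Nat) (acc : List (List Char)) : List (Nat × Char) → List (List Char)
  | [] => acc
  | (j, c) :: t => pvBLoop m (acc.set (j % m) (acc.getD (j % m) [] ++ [c])) t

def partition_text_alt (text : String) (n : Int) : List String :=
  let cs := pvClean text.toList
  if n ≤ 0 then []
  else
    (pvBLoop n.toNat (List.replicate n.toNat []) (pvIdx cs 0)).map (fun b => String.mk b)

-- ===== PRECONDITION & SPEC =====
def Spec_partition_text (text : String) (n : Int) (out : List String) : Prop := out = partition_text_alt text n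
instance (text : String) (n : Int) (out : List String) : Decidable (Spec_partition_text text n out) := by unfold Spec_partition_text; infer_instance

-- ===== CLAIM (what is proved, stated in full; the proofs are below) =====
def Claim_equal_partition_text : Prop := ∀ (text : String) (n : Int), Dom_partition_text text n → Spec_partition_text text n (partition_text text n)

-- ===== LEMMAS AND PROOFS =====

-- common description of column k: take positions k, k+m, k+2m, … by counting down
def pvPick (m : Nat) : List Char → Nat → List Char
  | [], _ => []
  | c :: t, k => if k = 0 then c :: pvPick m t (m - 1) else pvPick m t (k - 1)

-- first position ≥ 0 congruent to k modulo m when enumeration starts at j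
def pvPhase (m j k : Nat) : Nat := if j % m ≤ k then k - j % m else k + m - j % m

lemma pvColA_cons_aux (n : Int) : ∀ (K : Nat) (c : Char) (cs : List Char) (i : Int), 0 ≤ i →
    ((cs.length : Int) - i).toNat ≤ K → pvColA (c :: cs) n (i + 1) = pvColA cs n i := by
  intro K
  induction K with
  | zero =>
    intro c cs i hi hK
    have hl : (((c :: cs).length : Nat) : Int) = ((cs.length : Nat) : Int) + 1 := by
      simp
    rw [pvColA]; conv_rhs => rw [pvColA]
    split_ifs with h1 h2 h3
    · exfalso; omega
    · exfalso; rw [hl] at h1; omega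
    · exfalso; omega
    · rfl
  | succ K ih =>
    intro c cs i hi hK
    have hl : (((c :: cs).length : Nat) : Int) = ((cs.length : Nat) : Int) + 1 := by
      simp
    rw [pvColA]; conv_rhs => rw [pvColA]
    split_ifs with h1 h2 h3
    · have hi1 : (0:Int) ≤ i + 1 := by omega
      have hlen : i + 1 < ((c :: cs).length : Int) := h1.1
      rw [PySem.List.pyGetD_eq_getElem (c :: cs) ' ' hi1 hlen,
        PySem.List.pyGetD_eq_getElem cs ' ' hi h2.1]
      have hidx : (i + 1).toNat = i.toNat + 1 := by omega
      have harith : i + 1 + n = (i + n) + 1 := by ring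
      rw [harith, ih c cs (i + n) (by omega) (by rw [hl] at h1; omega)]
      simp [hidx]
    · exfalso; rw [hl] at h1; exact h2 ⟨by omega, h1.2⟩
    · exfalso; exact h1 ⟨by rw [hl]; omega, h3.2⟩
    · rfl

lemma pvColA_cons (n : Int) (c : Char) (cs : List Char) (i : Int) (hi : 0 ≤ i) :
    pvColA (c :: cs) n (i + 1) = pvColA cs n i :=
  pvColA_cons_aux n ((cs.length : Int) - i).toNat c cs i hi le_rfl

lemma pvColA_eq_pick (m : Nat) (hm : 0 < m) :
    ∀ (cs : List Char) (k : Nat), k < m → pvColA cs (m : Int) (k : Int) = pvPick m cs k := by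
  intro cs
  induction cs with
  | nil =>
    intro k hk
    rw [pvColA, pvPick]
    simp
  | cons c t ih =>
    intro k hk
    cases k with
    | zero =>
      rw [pvColA, pvPick]
      have hcond : ((0:Nat) : Int) < (((c :: t).length : Nat) : Int) ∧ 0 < (m : Int) := by
        constructor <;> [simp; exact_mod_cast hm]
      rw [dif_pos hcond]
      have hm1 : (m : Int) = ((m - 1 : Nat) : Int) + 1 := by omega
      have : pvColA (c :: t) (m : Int) (((0:Nat) : Int) + (m : Int)) = pvPick m t (m - 1) := by
        rw [show (((0:Nat) : Int) + (m : Int)) = ((m - 1 : Nat) : Int) + 1 by omega]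
        rw [pvColA_cons _ _ _ _ (by omega)]
        exact ih (m - 1) (by omega)
      rw [this]
      simp [PySem.List.pyGetD_zero_cons]
    | succ j =>
      rw [pvPick]
      have hcast : ((j + 1 : Nat) : Int) = ((j : Nat) : Int) + 1 := by push_cast; ring
      rw [hcast, pvColA_cons _ _ _ _ (by omega)]
      simp only [Nat.succ_ne_zero, if_false, Nat.add_sub_cancel]
      exact ih j (by omega)

lemma pvBLoop_length (m : Nat) : ∀ (ps : List (Nat × Char)) (acc : List (List Char)),
    (pvBLoop m acc ps).length = acc.length := by
  intro ps
  induction ps with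
  | nil => intro acc; rw [pvBLoop]
  | cons p t ih =>
    intro acc
    obtain ⟨j, c⟩ := p
    rw [pvBLoop, ih]
    simp

lemma pvBLoop_getD (m : Nat) (hm : 0 < m) : ∀ (ps : List (Nat × Char)) (acc : List (List Char)),
    acc.length = m → ∀ k, k < m →
    (pvBLoop m acc ps).getD k [] =
      acc.getD k [] ++ (ps.filter (fun p => p.1 % m == k)).map Prod.snd := by
  intro ps
  induction ps with
  | nil => intro acc _ k _; rw [pvBLoop]; simp
  | cons p t ih =>
    intro acc hlen k hk
    obtain ⟨j, c⟩ := p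
    rw [pvBLoop]
    have hjm : j % m < acc.length := by rw [hlen]; exact Nat.mod_lt _ hm
    have hlen' : (acc.set (j % m) (acc.getD (j % m) [] ++ [c])).length = m := by
      simp [hlen]
    rw [ih _ hlen' k hk]
    by_cases hcase : j % m = k
    · have hset : (acc.set (j % m) (acc.getD (j % m) [] ++ [c])).getD k [] =
          acc.getD (j % m) [] ++ [c] := by
        subst hcase
        simp [List.getD_eq_getElem?_getD, hjm]
      rw [hset, hcase]
      simp [hcase, List.append_assoc]
    · have hset : (acc.set (j % m) (acc.getD (j % m) [] ++ [c])).getD k [] =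
          acc.getD k [] := by
        simp [List.getD_eq_getElem?_getD, List.getElem?_set_ne hcase]
      rw [hset]
      simp [hcase]

lemma pvIdx_filter_eq_pick (m : Nat) (hm : 0 < m) :
    ∀ (cs : List Char) (j k : Nat), k < m →
    ((pvIdx cs j).filter (fun p => p.1 % m == k)).map Prod.snd = pvPick m cs (pvPhase m j k) := by
  intro cs
  induction cs with
  | nil => intro j k _; rw [pvIdx, pvPick]; rfl
  | cons c t ih =>
    intro j k hk
    rw [pvIdx]
    have ha : j % m < m := Nat.mod_lt _ hm
    have hb : (j + 1) % m = (j % m + 1) % m := (Nat.mod_add_mod j m 1).symm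
    have hb' : ((j + 1) % m = 0 ∧ j % m + 1 = m) ∨ ((j + 1) % m = j % m + 1 ∧ j % m + 1 < m) := by
      rcases Nat.lt_or_ge (j % m + 1) m with h | h
      · right; exact ⟨by rw [hb, Nat.mod_eq_of_lt h], h⟩
      · left
        have hEq : j % m + 1 = m := by omega
        rw [hb, hEq, Nat.mod_self]
        exact ⟨rfl, rfl⟩
    by_cases hcase : j % m = k
    · have hphase : pvPhase m j k = 0 := by unfold pvPhase; split_ifs <;> omega
      have hphase' : pvPhase m (j + 1) k = m - 1 := by
        unfold pvPhase
        rcases hb' with ⟨h, hm'⟩ | ⟨h, hlt⟩ <;> rw [h] <;> split_ifs <;> omega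
      rw [hphase, pvPick]
      simp only [List.filter_cons, hcase, beq_self_eq_true, if_true, List.map_cons]
      rw [ih (j + 1) k hk, hphase']
    · have hr : 0 < pvPhase m j k := by unfold pvPhase; split_ifs <;> omega
      have hphase' : pvPhase m (j + 1) k = pvPhase m j k - 1 := by
        unfold pvPhase
        rcases hb' with ⟨h, hm'⟩ | ⟨h, hlt⟩ <;> rw [h] <;> split_ifs <;> omega
      simp only [List.filter_cons]
      rw [if_neg (by simp [hcase])]
      rw [ih (j + 1) k hk, hphase']
      cases hpk : pvPhase m j k with
      | zero => omega
      | succ r => rw [pvPick]; simp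

lemma pvMain (m : Nat) (hm : 0 < m) (cs : List Char) :
    ((PySem.List.pyRange 0 (m : Int) 1).map (fun i => String.mk (pvColA cs (m : Int) i))) =
    (pvBLoop m (List.replicate m []) (pvIdx cs 0)).map (fun b => String.mk b) := by
  have hlenB : (pvBLoop m (List.replicate m []) (pvIdx cs 0)).length = m := by
    rw [pvBLoop_length]; simp
  rw [PySem.List.pyRange_one]
  simp only [sub_zero, Int.toNat_natCast, zero_add]
  apply List.ext_getElem
  · simp [hlenB]
  · intro k h1 h2
    simp only [List.getElem_map, List.getElem_range]
    have hk : k < m := by simpa using h1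
    have hbucket : (pvBLoop m (List.replicate m []) (pvIdx cs 0)).getD k [] = pvPick m cs k := by
      rw [pvBLoop_getD m hm _ _ (by simp) k hk, pvIdx_filter_eq_pick m hm cs 0 k hk]
      have : pvPhase m 0 k = k := by unfold pvPhase; simp [Nat.zero_mod]
      rw [this]
      simp [List.getD_eq_getElem?_getD, hk]
    have hget : (pvBLoop m (List.replicate m []) (pvIdx cs 0))[k] =
        (pvBLoop m (List.replicate m []) (pvIdx cs 0)).getD k [] := by
      rw [List.getD_eq_getElem?_getD, List.getElem?_eq_getElem (by omega)]
      rfl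
    rw [hget, hbucket, pvColA_eq_pick m hm cs k hk]

-- ===== VERDICT (by name: the statement is the Claim_ definition above) =====
theorem partition_text_spec : Claim_equal_partition_text := by
  intro text n _
  unfold Spec_partition_text partition_text partition_text_alt
  by_cases hn : n ≤ 0
  · simp [hn, PySem.List.pyRange_one_eq_nil]
  · have hpos : 0 < n := by omega
    have hn' : (n.toNat : Int) = n := Int.toNat_of_nonneg (by omega)
    simp only [if_neg hn]
    rw [← hn']
    exact pvMain n.toNat (by omega) (pvClean text.toList)
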